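-- pv_equiv track=rewrite | github.com/HimanshuLadva/Python-DSA | Leetcode/daily/202512/20251209.py | specialTripletsV1
-- ===== SOURCE A (Python) =====
-- from typing import List
--
-- def specialTripletsV1(nums: List[int]) -> int:
--     nlen = len(nums)
--     count = 0
--     for i in range(nlen):
--         for j in range(i+1, nlen):
--             for k in range(j+1, nlen):
--                 if nums[j] * 2 == nums[i] == nums[k]:
--                     count += 1
--     return count
-- ===== SOURCE B (Python) =====
-- from typing import List
--
-- def specialTripletsV1(nums: List[int]) -> int:
--     # Per-middle counting: for each middle index j, multiply the number of
--     # occurrences of 2*nums[j] to its left by the number to its right.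
--     n = len(nums)
--     total = 0
--     for j in range(n):
--         t = nums[j] * 2
--         total += nums[:j].count(t) * nums[j+1:].count(t)
--     return total
-- ===== Notes on version B (the rewrite author's own statement) =====
-- stated objective: faster
-- what changed: Replaces the triple nested loop over (i,j,k) with per-middle counting: for each middle index j, multiply the count of 2*nums[j] in the prefix by its count in the suffix.
import Mathlib
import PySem

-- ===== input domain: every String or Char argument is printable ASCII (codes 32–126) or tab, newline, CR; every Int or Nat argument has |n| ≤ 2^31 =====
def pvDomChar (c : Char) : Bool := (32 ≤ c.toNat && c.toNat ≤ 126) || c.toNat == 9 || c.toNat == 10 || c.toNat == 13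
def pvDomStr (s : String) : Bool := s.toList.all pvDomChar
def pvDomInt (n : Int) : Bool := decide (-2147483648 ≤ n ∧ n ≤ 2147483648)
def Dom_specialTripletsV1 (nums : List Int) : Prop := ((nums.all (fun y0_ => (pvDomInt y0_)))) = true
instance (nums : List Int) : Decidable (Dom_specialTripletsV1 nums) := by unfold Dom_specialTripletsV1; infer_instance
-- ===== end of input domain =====

-- ===== PORT A =====
-- Port of A: the literal triple nested loop over index triples (i, j, k).
def specialTripletsV1 (nums : List Int) : Int :=
  let nlen : Int := (nums.length : Int)
  (PySem.List.pyRange 0 nlen).foldl (fun count i =>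
    (PySem.List.pyRange (i + 1) nlen).foldl (fun count j =>
      (PySem.List.pyRange (j + 1) nlen).foldl (fun count k =>
        if PySem.List.pyGetD nums j 0 * 2 = PySem.List.pyGetD nums i 0 ∧
           PySem.List.pyGetD nums i 0 = PySem.List.pyGetD nums k 0 then count + 1
        else count) count) count) 0

-- ===== PORT B =====
-- Port of B: one pass over the middle index j, counting 2*nums[j] in prefix and suffix.
def specialTripletsV1_alt (nums : List Int) : Int :=
  let n : Int := (nums.length : Int)
  (PySem.List.pyRange 0 n).foldl (fun total j =>
    let t := PySem.List.pyGetD nums j 0 * 2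
    total + (PySem.List.count (PySem.List.slice nums none (some j)) t : Int) *
            (PySem.List.count (PySem.List.slice nums (some (j + 1)) none) t : Int)) 0

-- ===== PRECONDITION & SPEC =====
def Spec_specialTripletsV1 (nums : List Int) (out : Int) : Prop := out = specialTripletsV1_alt nums
instance (nums : List Int) (out : Int) : Decidable (Spec_specialTripletsV1 nums out) := by unfold Spec_specialTripletsV1; infer_instance

-- ===== CLAIM (what is proved, stated in full; the proofs are below) =====
def Claim_equal_specialTripletsV1 : Prop := ∀ (nums : List Int), Dom_specialTripletsV1 nums → Spec_specialTripletsV1 nums (specialTripletsV1 nums)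

-- ===== LEMMAS AND PROOFS =====

-- the count (as an Int) of 2*nums[j] strictly to the right of index j
def pvR (nums : List Int) (j : Nat) : Int := ((nums.drop (j + 1)).count (nums.getD j 0 * 2) : Int)
def pvF (nums : List Int) (i j : Nat) : Int :=
  if nums.getD j 0 * 2 = nums.getD i 0 then pvR nums j else 0
lemma pyRange_nil {a b : Int} (h : b ≤ a) : PySem.List.pyRange a b = [] := by
  refine List.eq_nil_iff_forall_not_mem.mpr fun x hx => ?_
  have := PySem.List.mem_pyRange_one.mp hx
  omega

lemma sum_map_pyRange (f : Int → Int) (a n : Nat) :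
    ((PySem.List.pyRange (a : Int) (n : Int)).map f).sum = ∑ k ∈ Finset.Ico a n, f (k : Int) := by
  induction n with
  | zero => rw [pyRange_nil (by exact_mod_cast Int.natCast_nonneg a)]; simp
  | succ m ih =>
    by_cases h : a ≤ m
    · have hc : ((m + 1 : Nat) : Int) = (m : Int) + 1 := by push_cast; ring
      rw [hc, PySem.List.pyRange_one_succ_right (by exact_mod_cast h), List.map_append,
        List.sum_append, ih, Finset.sum_Ico_succ_top h]
      simp
    · have : ((m + 1 : Nat) : Int) ≤ (a : Int) := by exact_mod_cast (by omega : m + 1 ≤ a)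
      rw [pyRange_nil this, Finset.Ico_eq_empty (by omega)]
      simp
lemma count_eq_sum (l : List Int) (v : Int) :
    (l.count v : Int) = ∑ k ∈ Finset.range l.length, if l.getD k 0 = v then 1 else 0 := by
  induction l with
  | nil => simp
  | cons x t ih =>
    rw [List.count_cons, List.length_cons, Finset.sum_range_succ']
    push_cast
    simp only [List.getD_cons_succ, List.getD_cons_zero, ← ih]
    by_cases hx : x = v <;> simp [hx]

lemma count_drop_eq (l : List Int) (a : Nat) (v : Int) :
    ((l.drop a).count v : Int) = ∑ k ∈ Finset.Ico a l.length, if l.getD k 0 = v then 1 else 0 := by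
  rw [count_eq_sum, Finset.sum_Ico_eq_sum_range, List.length_drop]
  refine Finset.sum_congr rfl fun k hk => ?_
  have hk' := Finset.mem_range.mp hk
  rw [List.getD_eq_getElem _ _ (by simpa using hk'), List.getD_eq_getElem _ _ (by omega),
    List.getElem_drop]

lemma count_take_eq (l : List Int) (j : Nat) (hj : j ≤ l.length) (v : Int) :
    ((l.take j).count v : Int) = ∑ i ∈ Finset.range j, if l.getD i 0 = v then 1 else 0 := by
  rw [count_eq_sum, List.length_take, Nat.min_eq_left hj]
  refine Finset.sum_congr rfl fun i hi => ?_
  have hi' := Finset.mem_range.mp hi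
  rw [List.getD_eq_getElem _ _ (by simp; omega), List.getD_eq_getElem _ _ (by omega),
    List.getElem_take]

lemma swap_sum (n : Nat) (f : Nat → Nat → Int) :
    ∑ i ∈ Finset.range n, ∑ j ∈ Finset.Ico (i + 1) n, f i j =
      ∑ j ∈ Finset.range n, ∑ i ∈ Finset.range j, f i j := by
  have key : ∑ i ∈ Finset.Ico 0 n, ∑ j ∈ Finset.Ico i n, (if i < j then f i j else 0) =
      ∑ j ∈ Finset.Ico 0 n, ∑ i ∈ Finset.Ico 0 (j + 1), (if i < j then f i j else 0) :=
    Finset.sum_Ico_Ico_comm 0 n _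
  calc ∑ i ∈ Finset.range n, ∑ j ∈ Finset.Ico (i + 1) n, f i j
      = ∑ i ∈ Finset.Ico 0 n, ∑ j ∈ Finset.Ico i n, (if i < j then f i j else 0) := by
        rw [← Finset.range_eq_Ico]
        refine Finset.sum_congr rfl fun i hi => ?_
        have hi' := Finset.mem_range.mp hi
        rw [Finset.sum_eq_sum_Ico_succ_bot hi']
        simp only [lt_irrefl, if_false, zero_add]
        exact Finset.sum_congr rfl fun j hj => by
          have := (Finset.mem_Ico.mp hj).1
          simp [Nat.lt_of_succ_le this]
    _ = ∑ j ∈ Finset.Ico 0 n, ∑ i ∈ Finset.Ico 0 (j + 1), (if i < j then f i j else 0) := key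
    _ = ∑ j ∈ Finset.range n, ∑ i ∈ Finset.range j, f i j := by
        rw [← Finset.range_eq_Ico]
        refine Finset.sum_congr rfl fun j hj => ?_
        rw [Finset.sum_range_succ]
        simp only [lt_irrefl, if_false, add_zero]
        exact Finset.sum_congr rfl fun i hi => by simp [Finset.mem_range.mp hi]

lemma sum_map_pyRange_zero (f : Int → Int) (n : Nat) :
    ((PySem.List.pyRange 0 (n : Int)).map f).sum = ∑ k ∈ Finset.range n, f (k : Int) := by
  rw [show (0 : Int) = ((0 : Nat) : Int) from rfl, sum_map_pyRange, ← Finset.range_eq_Ico]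

lemma A_eq (nums : List Int) :
    specialTripletsV1 nums =
      ∑ i ∈ Finset.range nums.length, ∑ j ∈ Finset.Ico (i + 1) nums.length, pvF nums i j := by
  unfold specialTripletsV1
  simp only [PySem.List.foldl_ite_add_one, PySem.List.foldl_add, zero_add]
  rw [sum_map_pyRange_zero]
  refine Finset.sum_congr rfl fun i hi => ?_
  rw [show ((i : Int) + 1) = (((i + 1 : Nat)) : Int) by push_cast; ring, sum_map_pyRange]
  refine Finset.sum_congr rfl fun j hj => ?_
  rw [← PySem.List.sum_map_ite_one_zero,
    show ((j : Int) + 1) = (((j + 1 : Nat)) : Int) by push_cast; ring, sum_map_pyRange]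
  simp only [PySem.List.pyGetD_natCast, decide_eq_true_eq]
  by_cases hc : nums.getD j 0 * 2 = nums.getD i 0
  · have hiff : ∀ k : Nat, (nums.getD j 0 * 2 = nums.getD i 0 ∧ nums.getD i 0 = nums.getD k 0) ↔
        nums.getD k 0 = nums.getD j 0 * 2 := fun k =>
      ⟨fun ⟨_, h⟩ => h.symm.trans hc.symm, fun h => ⟨hc, hc.symm.trans h.symm⟩⟩
    simp only [pvF, if_pos hc, pvR, count_drop_eq]
    exact Finset.sum_congr rfl fun k _ => by rw [if_congr (hiff k) rfl rfl]
  · simp only [pvF, if_neg hc]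
    exact Finset.sum_eq_zero fun k _ => by rw [if_neg (by tauto)]

lemma B_eq (nums : List Int) :
    specialTripletsV1_alt nums =
      ∑ j ∈ Finset.range nums.length, ∑ i ∈ Finset.range j, pvF nums i j := by
  unfold specialTripletsV1_alt
  simp only [PySem.List.foldl_add, zero_add]
  rw [sum_map_pyRange_zero]
  refine Finset.sum_congr rfl fun j hj => ?_
  have hj' := Finset.mem_range.mp hj
  rw [show ((j : Int) + 1) = (((j + 1 : Nat)) : Int) by push_cast; ring]
  rw [PySem.List.slice_to nums (by exact_mod_cast Nat.zero_le j),
      PySem.List.slice_from nums (by exact_mod_cast Nat.zero_le (j+1))]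
  simp only [PySem.List.pyGetD_natCast, Int.toNat_natCast, PySem.List.count]
  rw [count_take_eq nums j (le_of_lt hj'), Finset.sum_mul]
  refine Finset.sum_congr rfl fun i hi => ?_
  simp only [pvF, pvR]
  by_cases hc : nums.getD j 0 * 2 = nums.getD i 0
  · rw [if_pos hc, if_pos hc.symm, one_mul]
  · rw [if_neg hc, if_neg (fun h => hc h.symm), zero_mul]

-- ===== VERDICT (by name: the statement is the Claim_ definition above) =====
theorem specialTripletsV1_spec : Claim_equal_specialTripletsV1 := by
  intro nums _
  unfold Spec_specialTripletsV1
  rw [A_eq, B_eq, swap_sum]
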